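-- pv_equiv track=rewrite | github.com/cristianolarrea/datagrid | datagrid.py | _preProcessingCreationDate
-- ===== SOURCE A (Python) =====
-- def _preProcessingCreationDate(arr):
--     final = []
--     for element in arr:
--         element = element.replace("/", "")
--         element = element.replace(":", "")
--         element = element.replace(" ", "")
--         final.append(element)
--     return final
-- ===== SOURCE B (Python) =====
-- def _preProcessingCreationDate(arr):
--     bad = {'/', ':', ' '}
--     return [''.join(c for c in element if c not in bad) for element in arr]
-- ===== Notes on version B (the rewrite author's own statement) =====
-- stated objective: simpler
-- what changed: Replaces three sequential whole-string .replace passes and an accumulator loop with a single list comprehension doing one character-level membership-filtered pass per string against a set of bad characters.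
import Mathlib
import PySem

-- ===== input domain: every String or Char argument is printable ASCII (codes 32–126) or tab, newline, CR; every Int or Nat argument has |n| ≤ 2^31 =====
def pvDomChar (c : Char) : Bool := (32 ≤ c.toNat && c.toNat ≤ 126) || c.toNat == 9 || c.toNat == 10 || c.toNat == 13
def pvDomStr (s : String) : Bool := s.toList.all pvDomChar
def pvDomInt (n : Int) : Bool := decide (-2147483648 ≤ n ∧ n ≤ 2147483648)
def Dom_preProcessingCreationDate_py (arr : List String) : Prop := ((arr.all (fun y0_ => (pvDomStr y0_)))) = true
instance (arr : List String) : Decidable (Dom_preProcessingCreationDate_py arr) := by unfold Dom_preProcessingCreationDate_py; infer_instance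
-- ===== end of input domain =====

-- B replaces A's three sequential .replace scans per string with one set-membership
-- character filter per string, built as a single list comprehension (simpler, one pass).
-- ===== PORT A =====
def preProcessingCreationDate_py (arr : List String) : List String :=
  arr.foldl (fun final element =>
    let e1 := PySem.Str.replace element "/" ""
    let e2 := PySem.Str.replace e1 ":" ""
    let e3 := PySem.Str.replace e2 " " ""
    final ++ [e3]) []

-- ===== PORT B =====
def pvBadChar (c : Char) : Bool := c == '/' || c == ':' || c == ' '

def preProcessingCreationDate_py_alt (arr : List String) : List String :=
  arr.map (fun element => String.ofList (element.toList.filter (fun c => !pvBadChar c)))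

-- ===== PRECONDITION & SPEC =====
def Spec_preProcessingCreationDate_py (arr : List String) (out : List String) : Prop := out = preProcessingCreationDate_py_alt arr
instance (arr : List String) (out : List String) : Decidable (Spec_preProcessingCreationDate_py arr out) := by unfold Spec_preProcessingCreationDate_py; infer_instance

-- ===== CLAIM (what is proved, stated in full; the proofs are below) =====
def Claim_equal_preProcessingCreationDate_py : Prop := ∀ (arr : List String), Dom_preProcessingCreationDate_py arr → Spec_preProcessingCreationDate_py arr (preProcessingCreationDate_py arr)

-- ===== LEMMAS AND PROOFS =====

-- replace.go with a one-char pattern and empty replacement is a filter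
theorem pv_go_single (a : Char) (l : List Char) (acc : List Char) (fuel : Nat) (h : l.length ≤ fuel) :
    PySem.Chars.replace.go [a] [] fuel l acc = acc.reverse ++ l.filter (fun c => !(c == a)) := by
  induction l generalizing fuel acc with
  | nil => cases fuel <;> simp [PySem.Chars.replace.go]
  | cons c t ih =>
    cases fuel with
    | zero => simp at h
    | succ n =>
      rw [PySem.Chars.replace.go]
      have hpre : [a].isPrefixOf (c :: t) = (a == c) := by
        unfold List.isPrefixOf; simp
      by_cases hc : c = a
      · subst hc
        rw [hpre, if_pos (by simp)]
        simp only [List.length_cons, List.length_nil, List.drop_succ_cons, List.drop_zero,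
          List.reverse_nil, List.nil_append]
        rw [ih acc n (by simpa using h)]
        simp
      · have hba : (a == c) = false := by simp; exact fun e => hc e.symm
        rw [hpre, hba, if_neg (by simp)]
        rw [ih (c :: acc) n (by simpa using h)]
        simp [hc]

theorem pv_rep_single (a : Char) (cs : List Char) :
    PySem.Chars.replace cs [a] [] = cs.filter (fun c => !(c == a)) := by
  rw [PySem.Chars.replace]
  simp [pv_go_single a cs [] cs.length le_rfl]

-- one element: the three replace passes equal one filter pass
theorem pv_elem (s : String) :
    PySem.Str.replace (PySem.Str.replace (PySem.Str.replace s "/" "") ":" "") " " "" =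
      String.ofList (s.toList.filter (fun c => !pvBadChar c)) := by
  apply String.toList_injective
  rw [String.toList_ofList]
  simp only [PySem.Str.toList_replace]
  have h1 : ("/" : String).toList = ['/'] := rfl
  have h2 : (":" : String).toList = [':'] := rfl
  have h3 : (" " : String).toList = [' '] := rfl
  have h0 : ("" : String).toList = [] := rfl
  rw [h1, h2, h3, h0, pv_rep_single, pv_rep_single, pv_rep_single,
    List.filter_filter, List.filter_filter]
  apply List.filter_congr
  intro c _
  simp only [pvBadChar, Bool.not_or]
  rw [Bool.and_comm, Bool.and_assoc]
  rw [Bool.and_comm (!c == ':')]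

theorem pv_foldl_append {α β : Type} (f : α → β) (arr : List α) (acc : List β) :
    arr.foldl (fun fin e => fin ++ [f e]) acc = acc ++ arr.map f := by
  induction arr generalizing acc with
  | nil => simp
  | cons h t ih => simp [List.foldl, ih]

theorem pv_A_eq_B (arr : List String) :
    preProcessingCreationDate_py arr = preProcessingCreationDate_py_alt arr := by
  unfold preProcessingCreationDate_py preProcessingCreationDate_py_alt
  simp only []
  rw [show (fun (final : List String) (element : String) =>
      let e1 := PySem.Str.replace element "/" ""
      let e2 := PySem.Str.replace e1 ":" ""
      let e3 := PySem.Str.replace e2 " " ""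
      final ++ [e3]) = fun fin e => fin ++
        [String.ofList (e.toList.filter (fun c => !pvBadChar c))] from
    funext fun fin => funext fun e => by simp only [pv_elem]]
  exact pv_foldl_append _ arr []

-- ===== VERDICT (by name: the statement is the Claim_ definition above) =====
theorem preProcessingCreationDate_py_spec : Claim_equal_preProcessingCreationDate_py := by
  intro arr _
  unfold Spec_preProcessingCreationDate_py
  exact pv_A_eq_B arr
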